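-- pv_equiv track=rewrite | github.com/linDing-group/Deep-Kcr | code/featureForCKSAAP_PWAA_AAindex_CTD_EBGW.py | _transform4
-- ===== SOURCE A (Python) =====
-- def _transform4(sequence1):
--     char_4 = ''
--     class1 = 'GASDT'
--     class2 = 'CPNVEQIL'
--     class3 = 'KMHFRYW'
--     for element4 in sequence1:
--         if element4 in class1:
--             char_4 += 'P'
--         elif element4 in class2:
--             char_4 += 'N'
--         elif element4 in class3:
--             char_4 += 'H'
--         else:
--             char_4 += 'X'
--     return char_4
-- ===== SOURCE B (Python) =====
-- _KEY = 'GASDTCPNVEQILKMHFRYW'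
-- _VAL = 'PPPPPNNNNNNNNHHHHHHHX'
--
-- def _transform4(sequence1):
--     # positional lookup: find the letter's index in _KEY and read the class
--     # char at the same position in _VAL; an absent letter gives find = -1,
--     # which indexes _VAL's last char, the default class.
--     return ''.join(_VAL[_KEY.find(c)] for c in sequence1)
-- ===== Notes on version B (the rewrite author's own statement) =====
-- stated objective: alternative
-- what changed: Replaces the four-branch membership chain with quadratic string accumulation by a positional parallel-array lookup: each char is found by index in a key string and the class char read at the same position of a value string, an absent char's find result of -1 landing on the value string's trailing default class via negative indexing.
import Mathlib
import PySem

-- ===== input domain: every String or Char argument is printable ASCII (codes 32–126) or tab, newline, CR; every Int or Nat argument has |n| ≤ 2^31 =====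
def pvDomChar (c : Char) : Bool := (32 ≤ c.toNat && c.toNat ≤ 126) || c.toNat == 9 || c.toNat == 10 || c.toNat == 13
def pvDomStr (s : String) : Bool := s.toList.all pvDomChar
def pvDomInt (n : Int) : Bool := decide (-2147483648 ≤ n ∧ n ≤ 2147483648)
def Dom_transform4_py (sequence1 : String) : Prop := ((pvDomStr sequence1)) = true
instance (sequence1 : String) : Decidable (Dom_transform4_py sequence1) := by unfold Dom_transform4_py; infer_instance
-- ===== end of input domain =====

-- B replaces the four-branch membership chain with per-character string accumulation by a
-- positional parallel-array lookup: find the char's index in a key string and read the class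
-- char at the same position of a value string, an absent char's find = -1 hitting the value string's last, default class char via negative indexing (alternative).

-- ===== PORT A =====
-- loop: for element4 in sequence1, appending the class char chosen by the if/elif chain to char_4
def transform4_py (sequence1 : String) : String :=
  String.ofList (sequence1.toList.foldl
    (fun char_4 element4 =>
      char_4 ++ [if element4 ∈ "GASDT".toList then 'P'
                 else if element4 ∈ "CPNVEQIL".toList then 'N'
                 else if element4 ∈ "KMHFRYW".toList then 'H'
                 else 'X'])
    [])

-- ===== PORT B =====
-- the module-level parallel strings _KEY and _VAL of Source B
def pvKey : String := "GASDTCPNVEQILKMHFRYW"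
def pvVal : String := "PPPPPNNNNNNNNHHHHHHHX"

-- ''.join(_VAL[_KEY.find(c)] for c in sequence1); the .getD is only a totality guard:
-- find yields an Int in [-1, 19], always a valid (possibly negative) index into the 22-char _VAL
def transform4_py_alt (sequence1 : String) : String :=
  String.ofList (sequence1.toList.map (fun c =>
    (PySem.Str.pyGet? pvVal (PySem.Str.find pvKey (String.ofList [c]))).getD '?'))

-- ===== PRECONDITION & SPEC =====
def Spec_transform4_py (sequence1 : String) (out : String) : Prop := out = transform4_py_alt sequence1
instance (sequence1 : String) (out : String) : Decidable (Spec_transform4_py sequence1 out) := by unfold Spec_transform4_py; infer_instance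

-- ===== CLAIM (what is proved, stated in full; the proofs are below) =====
def Claim_equal_transform4_py : Prop := ∀ (sequence1 : String), Dom_transform4_py sequence1 → Spec_transform4_py sequence1 (transform4_py sequence1)

-- ===== LEMMAS AND PROOFS =====

theorem pv_singleton_infix {c : Char} {l : List Char} : ([c] <:+: l) ↔ c ∈ l := by
  constructor
  · intro h; exact h.mem (by simp)
  · intro h
    obtain ⟨s, t, rfl⟩ := List.append_of_mem h
    exact ⟨s, t, by simp⟩

-- pointwise: B's positional lookup returns exactly the char chosen by A's if/elif chain
theorem pv_lookup (c : Char) :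
    (PySem.Str.pyGet? pvVal (PySem.Str.find pvKey (String.ofList [c]))).getD '?' =
      (if c ∈ "GASDT".toList then 'P'
       else if c ∈ "CPNVEQIL".toList then 'N'
       else if c ∈ "KMHFRYW".toList then 'H'
       else 'X') := by
  by_cases hm : c ∈ pvKey.toList
  · have : pvKey.toList = ['G','A','S','D','T','C','P','N','V','E','Q','I','L','K','M','H','F','R','Y','W'] := by decide
    rw [this] at hm
    fin_cases hm <;> rfl
  · have hfind : PySem.Str.find pvKey (String.ofList [c]) = -1 := by
      rw [PySem.Str.find_eq]
      rw [PySem.Chars.find_eq_neg_one_iff]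
      simpa [pv_singleton_infix] using hm
    have : pvKey.toList = ['G','A','S','D','T','C','P','N','V','E','Q','I','L','K','M','H','F','R','Y','W'] := by decide
    rw [this] at hm
    simp only [List.mem_cons, List.not_mem_nil, or_false, not_or] at hm
    rw [hfind]
    have e1 : "GASDT".toList = ['G','A','S','D','T'] := by decide
    have e2 : "CPNVEQIL".toList = ['C','P','N','V','E','Q','I','L'] := by decide
    have e3 : "KMHFRYW".toList = ['K','M','H','F','R','Y','W'] := by decide
    rw [e1, e2, e3]
    obtain ⟨h1,h2,h3,h4,h5,h6,h7,h8,h9,h10,h11,h12,h13,h14,h15,h16,h17,h18,h19,h20⟩ := hm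
    simp [h1,h2,h3,h4,h5,h6,h7,h8,h9,h10,h11,h12,h13,h14,h15,h16,h17,h18,h19,h20]
    rfl

-- A's append-accumulating fold equals B's map, for any starting accumulator
theorem pv_foldl_eq (l : List Char) (acc : List Char) :
    l.foldl
      (fun char_4 element4 =>
        char_4 ++ [if element4 ∈ "GASDT".toList then 'P'
                   else if element4 ∈ "CPNVEQIL".toList then 'N'
                   else if element4 ∈ "KMHFRYW".toList then 'H'
                   else 'X'])
      acc
      = acc ++ l.map (fun c =>
          (PySem.Str.pyGet? pvVal (PySem.Str.find pvKey (String.ofList [c]))).getD '?') := by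
  induction l generalizing acc with
  | nil => simp
  | cons c t ih =>
    rw [List.foldl_cons, ih, List.map_cons, ← pv_lookup c]
    simp

-- ===== VERDICT (by name: the statement is the Claim_ definition above) =====
theorem transform4_py_spec : Claim_equal_transform4_py := by
  intro s _
  unfold Spec_transform4_py transform4_py transform4_py_alt
  rw [pv_foldl_eq]
  simp
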